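-- pv_equiv track=rewrite | github.com/2774512h/Automated-Design-Space-Exploration-of-FPGA-based-Accelerators-using-LLMs | src/experiment_infer.py | rag_prompt
-- ===== SOURCE A (Python) =====
-- def rag_prompt(
--     query: str,
--     context_items,
--     max_context_chars: int = 6000,
-- ) -> str:
--     system_instruction = (
--         ""
--     )
--
--     context_parts = [] # List of text chunks
--     total_chars=0
--
--     for item in context_items:
--         text = item["text"].strip()
--         if not text:
--             continue
--         if total_chars + len(text) > max_context_chars:
--             break
--         context_parts.append(text)
--         total_chars += len(text)
--
--     context_block = "\n\n".join(context_parts) if context_parts else "[NO CONTEXT RETRIEVED]"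
--
--     prompt = (
--         f"{system_instruction}\n\n"
--         f"Context:\n{context_block}\n\n"
--         f"Question:\n{query}\n\n"
--         f"Answer:"
--     )
--     return prompt
-- ===== SOURCE B (Python) =====
-- def rag_prompt(query, context_items, max_context_chars=6000):
--     # clean -> prefix sums -> cut at first overflow
--     cleaned = [t for item in context_items if (t := item["text"].strip())]
--     sums, s = [], 0
--     for t in cleaned:
--         s += len(t)
--         sums.append(s)
--     k = next((i for i, c in enumerate(sums) if c > max_context_chars), len(cleaned))
--     parts = cleaned[:k]
--     context_block = "\n\n".join(parts) if parts else "[NO CONTEXT RETRIEVED]"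
--     return f"\n\nContext:\n{context_block}\n\nQuestion:\n{query}\n\nAnswer:"
-- ===== Notes on version B (the rewrite author's own statement) =====
-- stated objective: alternative
-- what changed: Replaces A's single greedy loop (running total + break) by a three-stage pipeline: build the list of non-empty stripped texts, form running prefix sums of their lengths, cut at the first index whose prefix sum exceeds the budget, then join.
import Mathlib
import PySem

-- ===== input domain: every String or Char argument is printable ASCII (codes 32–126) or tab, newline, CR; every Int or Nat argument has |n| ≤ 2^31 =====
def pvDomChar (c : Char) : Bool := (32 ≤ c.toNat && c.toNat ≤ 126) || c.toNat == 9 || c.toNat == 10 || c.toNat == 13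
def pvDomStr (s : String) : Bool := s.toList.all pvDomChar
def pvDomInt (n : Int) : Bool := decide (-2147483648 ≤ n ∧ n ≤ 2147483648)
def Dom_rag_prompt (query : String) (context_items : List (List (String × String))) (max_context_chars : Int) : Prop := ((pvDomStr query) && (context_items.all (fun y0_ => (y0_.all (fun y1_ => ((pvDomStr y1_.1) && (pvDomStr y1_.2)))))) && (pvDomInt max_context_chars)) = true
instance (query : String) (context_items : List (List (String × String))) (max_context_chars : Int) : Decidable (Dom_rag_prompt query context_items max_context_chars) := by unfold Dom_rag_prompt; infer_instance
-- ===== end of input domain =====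

-- B replaces A's single greedy accumulator loop by a clean → prefix-sums → cut-at-first-overflow
-- pipeline (objective: alternative decomposition, same cost); return value proved equal on Pre_.

-- ===== PORT A =====
-- A's loop: accumulate stripped texts and a running char total, break on first overflow.
def ragLoopA (maxc : Int) : List (List (String × String)) → List String → Int → List String
  | [], parts, _ => parts
  | item :: rest, parts, total =>
    let text := PySem.Str.strip (((PySem.Dict.mk item).get? "text").getD "")
    if text = "" then ragLoopA maxc rest parts total
    else if total + PySem.Str.len text > maxc then parts
    else ragLoopA maxc rest (parts ++ [text]) (total + PySem.Str.len text)

def rag_prompt (query : String) (context_items : List (List (String × String))) (max_context_chars : Int) : String :=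
  let context_parts := ragLoopA max_context_chars context_items [] 0
  let context_block := if context_parts ≠ [] then PySem.Str.join "\n\n" context_parts else "[NO CONTEXT RETRIEVED]"
  "" ++ "\n\n" ++ "Context:\n" ++ context_block ++ "\n\n" ++ "Question:\n" ++ query ++ "\n\n" ++ "Answer:"

-- ===== PORT B =====
-- cleaned = [t for item in context_items if (t := item["text"].strip())]
def ragCleanB (context_items : List (List (String × String))) : List String :=
  context_items.filterMap (fun item =>
    let t := PySem.Str.strip (((PySem.Dict.mk item).get? "text").getD "")
    if t = "" then none else some t)

-- running prefix sums of lengths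
def ragSumsB (cleaned : List String) : List Int :=
  (cleaned.foldl (fun (p : List Int × Int) t =>
    let s := p.2 + PySem.Str.len t
    (p.1 ++ [s], s)) ([], 0)).1

-- next((i for i, c in enumerate(sums) if c > max_context_chars), len(cleaned))
def ragKB (sums : List Int) (maxc : Int) (dflt : Nat) : Nat :=
  match sums.findIdx? (fun c => decide (c > maxc)) with
  | some i => i
  | none => dflt

def rag_prompt_alt (query : String) (context_items : List (List (String × String))) (max_context_chars : Int) : String :=
  let cleaned := ragCleanB context_items
  let k := ragKB (ragSumsB cleaned) max_context_chars cleaned.length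
  let parts := cleaned.take k
  let context_block := if parts ≠ [] then PySem.Str.join "\n\n" parts else "[NO CONTEXT RETRIEVED]"
  "" ++ "\n\n" ++ "Context:\n" ++ context_block ++ "\n\n" ++ "Question:\n" ++ query ++ "\n\n" ++ "Answer:"

-- ===== PRECONDITION & SPEC =====
-- Pre_ excludes items without a "text" key: on these A raises KeyError unless its budget break
-- happens to skip the offending item (then A returns while B, which cleans every item first, raises).
def Pre_rag_prompt (query : String) (context_items : List (List (String × String))) (max_context_chars : Int) : Prop :=
  ∀ item ∈ context_items, ((PySem.Dict.mk item).get? "text").isSome = true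
instance (query : String) (context_items : List (List (String × String))) (max_context_chars : Int) : Decidable (Pre_rag_prompt query context_items max_context_chars) := by unfold Pre_rag_prompt; infer_instance

def pvWitness_rag_prompt : String × (List (List (String × String))) × Int :=
  ("what is an FPGA?", [[("text", " some context ")], [("text", "more")]], 50)

def Spec_rag_prompt (query : String) (context_items : List (List (String × String))) (max_context_chars : Int) (out : String) : Prop := out = rag_prompt_alt query context_items max_context_chars
instance (query : String) (context_items : List (List (String × String))) (max_context_chars : Int) (out : String) : Decidable (Spec_rag_prompt query context_items max_context_chars out) := by unfold Spec_rag_prompt; infer_instance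

-- ===== CLAIM (what is proved, stated in full; the proofs are below) =====
def Claim_equal_rag_prompt : Prop := ∀ (query : String) (context_items : List (List (String × String))) (max_context_chars : Int), Dom_rag_prompt query context_items max_context_chars → Pre_rag_prompt query context_items max_context_chars → Spec_rag_prompt query context_items max_context_chars (rag_prompt query context_items max_context_chars)

-- ===== LEMMAS AND PROOFS =====

-- canonical greedy cut: the common value of both pipelines
def takeB (b : Int) : List String → List String
  | [] => []
  | t :: ts => if PySem.Str.len t > b then [] else t :: takeB (b - PySem.Str.len t) ts

-- functional prefix sums starting from s
def sumsFrom (s : Int) : List String → List Int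
  | [] => []
  | t :: ts => (s + PySem.Str.len t) :: sumsFrom (s + PySem.Str.len t) ts

lemma ragLoopA_eq (maxc : Int) : ∀ (items : List (List (String × String))) (parts : List String) (total : Int),
    ragLoopA maxc items parts total = parts ++ takeB (maxc - total) (ragCleanB items) := by
  intro items
  induction items with
  | nil => intro parts total; simp [ragLoopA, ragCleanB, takeB]
  | cons item rest ih =>
    intro parts total
    simp only [ragLoopA, ragCleanB, List.filterMap_cons]
    by_cases h : PySem.Str.strip (((PySem.Dict.mk item).get? "text").getD "") = ""
    · simp only [h]
      simpa [ragCleanB] using ih parts total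
    · simp only [if_neg h]
      set L := PySem.Str.len (PySem.Str.strip (((PySem.Dict.mk item).get? "text").getD "")) with hL
      by_cases hb : total + L > maxc
      · rw [if_pos hb, takeB, if_pos (by omega)]
        simp
      · rw [if_neg hb, takeB, if_neg (by omega)]
        rw [ih (parts ++ [_]) _]
        simp only [List.append_assoc, List.singleton_append]
        rw [sub_sub]
        rfl

lemma sumsB_fst (ts : List String) : ∀ (acc : List Int) (s : Int),
    (ts.foldl (fun (p : List Int × Int) t =>
      let s := p.2 + PySem.Str.len t
      (p.1 ++ [s], s)) (acc, s)).1 = acc ++ sumsFrom s ts := by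
  induction ts with
  | nil => intro acc s; simp [sumsFrom]
  | cons t ts ih =>
    intro acc s
    simp only [List.foldl_cons, sumsFrom]
    rw [ih]
    simp

lemma take_k_eq_takeB (maxc : Int) : ∀ (cleaned : List String) (s : Int),
    cleaned.take (ragKB (sumsFrom s cleaned) maxc cleaned.length) = takeB (maxc - s) cleaned := by
  intro cleaned
  induction cleaned with
  | nil => intro s; simp [sumsFrom, ragKB, takeB, List.findIdx?]
  | cons t ts ih =>
    intro s
    simp only [sumsFrom, ragKB, List.findIdx?_cons]
    by_cases h : s + PySem.Str.len t > maxc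
    · rw [if_pos (by simpa using h)]
      rw [takeB, if_pos (by omega)]
      simp
    · rw [if_neg (by simpa using h)]
      rw [takeB, if_neg (by omega)]
      have := ih (s + PySem.Str.len t)
      simp only [ragKB] at this
      cases hfi : (sumsFrom (s + PySem.Str.len t) ts).findIdx? (fun c => decide (c > maxc)) with
      | none =>
        simp only [hfi, Option.map_none] at this ⊢
        rw [List.length_cons, List.take_succ_cons, sub_sub, ← this]
      | some i =>
        simp only [hfi, Option.map_some] at this ⊢
        rw [List.take_succ_cons, sub_sub, ← this]

-- ===== VERDICT (by name: the statement is the Claim_ definition above) =====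
theorem rag_prompt_spec : Claim_equal_rag_prompt := by
  intro query items maxc _ _
  have hA : ragLoopA maxc items [] 0 = takeB maxc (ragCleanB items) := by
    rw [ragLoopA_eq]; simp
  have hB : (ragCleanB items).take (ragKB (ragSumsB (ragCleanB items)) maxc (ragCleanB items).length) = takeB maxc (ragCleanB items) := by
    have hs : ragSumsB (ragCleanB items) = sumsFrom 0 (ragCleanB items) := by
      unfold ragSumsB; rw [sumsB_fst]; simp
    rw [hs]
    have := take_k_eq_takeB maxc (ragCleanB items) 0
    simpa using this
  simp only [Spec_rag_prompt, rag_prompt, rag_prompt_alt, hA, hB]
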